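-- pv_equiv track=rewrite | github.com/Solene-Dts/image-analysis-scripts | distance_analysis.py | lists_are_easier
-- ===== SOURCE A (Python) =====
-- def lists_are_easier(histo_dict):
--     '''
--     Makes a list of values out of a dictionary suited for histogram plotting.
--     '''
--     results = []
--     for i in range(9): #area + intensity + 7 distance categories
--         results.append([])
--         for vessel in histo_dict.keys():
--             if len(histo_dict[vessel]) > i:
--                 results[i].append(histo_dict[vessel][i])
--             else :
--                 results[i].append(0)
--     return results
-- ===== SOURCE B (Python) =====
-- def lists_are_easier(histo_dict):
--     '''
--     Makes a list of values out of a dictionary suited for histogram plotting.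
--     '''
--     results = [[] for _ in range(9)]
--     for vals in histo_dict.values():
--         head = list(vals[:9])
--         row = head + [0] * (9 - len(head))
--         for col, x in zip(results, row):
--             col.append(x)
--     return results
-- ===== Notes on version B (the rewrite author's own statement) =====
-- stated objective: alternative
-- what changed: B builds all nine histogram lists in a single pass over the dictionary's values (zipping each vessel's zero-padded first nine entries onto the nine accumulating columns) instead of A's nine separate scans of the dictionary.
import Mathlib
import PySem

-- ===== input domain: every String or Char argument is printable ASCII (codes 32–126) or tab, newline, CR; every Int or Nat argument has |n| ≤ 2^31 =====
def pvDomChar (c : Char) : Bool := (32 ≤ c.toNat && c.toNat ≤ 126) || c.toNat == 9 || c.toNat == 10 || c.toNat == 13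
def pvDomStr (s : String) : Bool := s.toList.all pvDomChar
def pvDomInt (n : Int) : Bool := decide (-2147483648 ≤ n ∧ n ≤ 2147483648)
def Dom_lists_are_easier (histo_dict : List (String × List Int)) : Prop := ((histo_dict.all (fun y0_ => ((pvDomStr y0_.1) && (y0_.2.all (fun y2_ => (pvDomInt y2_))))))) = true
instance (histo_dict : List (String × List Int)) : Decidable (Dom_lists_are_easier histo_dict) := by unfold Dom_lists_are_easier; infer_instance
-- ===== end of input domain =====

-- B builds all nine output lists in one pass over the dict (zero-padded row zipped onto the columns)
-- instead of A's nine separate scans; an alternative decomposition, return value identical.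

-- ===== PORT A =====
-- A: for i in range(9): results.append([]); for vessel in keys: append vals[i] if len>i else 0.
def lists_are_easier (histo_dict : List (String × List Int)) : List (List Int) :=
  let d := PySem.Dict.ofList histo_dict
  (PySem.List.pyRange 0 9 1).foldl
    (fun results i =>
      results ++
        [(PySem.Dict.keys d).foldl
          (fun col vessel =>
            let vals := PySem.Dict.getD d vessel []
            if i < (vals.length : Int) then col ++ [PySem.List.pyGetD vals i 0]
            else col ++ [0])
          []])
    []

-- ===== PORT B =====
def pvRow (vals : List Int) : List Int :=
  PySem.List.slice vals none (some 9) ++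
    List.replicate (9 - (PySem.List.slice vals none (some 9)).length) 0

def lists_are_easier_alt (histo_dict : List (String × List Int)) : List (List Int) :=
  let d := PySem.Dict.ofList histo_dict
  (PySem.Dict.values d).foldl
    (fun results vals => ((results.zip (pvRow vals)).map (fun p => p.1 ++ [p.2])))
    (List.replicate 9 [])

-- ===== PRECONDITION & SPEC =====
def Spec_lists_are_easier (histo_dict : List (String × List Int)) (out : List (List Int)) : Prop := out = lists_are_easier_alt histo_dict
instance (histo_dict : List (String × List Int)) (out : List (List Int)) : Decidable (Spec_lists_are_easier histo_dict out) := by unfold Spec_lists_are_easier; infer_instance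

-- ===== CLAIM (what is proved, stated in full; the proofs are below) =====
def Claim_equal_lists_are_easier : Prop := ∀ (histo_dict : List (String × List Int)), Dom_lists_are_easier histo_dict → Spec_lists_are_easier histo_dict (lists_are_easier histo_dict)

-- ===== LEMMAS AND PROOFS =====

-- the value A places at column i for a vessel with value list v
def pvEntry (v : List Int) (i : Int) : Int :=
  if i < (v.length : Int) then PySem.List.pyGetD v i 0 else 0

theorem pvRow_length (v : List Int) : (pvRow v).length = 9 := by
  simp [pvRow, PySem.List.slice_to]

theorem pvRow_getD (v : List Int) (j : Nat) (hj : j < 9) :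
    (pvRow v).getD j 0 = pvEntry v (j : Int) := by
  unfold pvRow pvEntry
  rw [PySem.List.slice_to v (by norm_num)]
  by_cases h : j < v.length
  · have h9 : j < (v.take (9:Int).toNat).length := by simp; omega
    rw [List.getD_eq_getElem _ _ (by simp; omega)]
    have hc : (j : Int) < (v.length : Int) := by exact_mod_cast h
    rw [if_pos hc]
    rw [PySem.List.pyGetD_eq_getElem v 0 (by positivity) (by exact_mod_cast h)]
    rw [List.getElem_append_left h9, List.getElem_take]
    simp
  · have hc : ¬ ((j:Int) < (v.length : Int)) := by exact_mod_cast h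
    rw [if_neg hc]
    by_cases h2 : j < (v.take (9:Int).toNat ++ List.replicate (9 - (v.take (9:Int).toNat).length) 0).length
    · rw [List.getD_eq_getElem _ _ h2]
      rw [List.getElem_append_right (by simp; omega)]
      simp
    · rw [List.getD_eq_default _ _ (by omega)]

-- one B step on nine columns, described per index
theorem pvStep (cols : List (List Int)) (v : List Int) (hc : cols.length = 9) :
    (cols.zip (pvRow v)).map (fun p => p.1 ++ [p.2])
      = (List.range 9).map (fun j => cols.getD j [] ++ [pvEntry v (j : Int)]) := by
  apply List.ext_getElem
  · simp [pvRow_length, hc]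
  · intro j h1 h2
    simp only [List.length_map, List.length_zip, pvRow_length, hc, Nat.min_self] at h1
    simp only [List.getElem_map, List.getElem_zip, List.getElem_range]
    rw [List.getD_eq_getElem _ _ (by omega), ← pvRow_getD v j h1,
        List.getD_eq_getElem _ _ (by rw [pvRow_length]; omega)]

-- B's fold over the value lists, fully characterised
theorem pvB_fold (vs : List (List Int)) (cols : List (List Int)) (hc : cols.length = 9) :
    vs.foldl (fun results vals => ((results.zip (pvRow vals)).map (fun p => p.1 ++ [p.2]))) cols
      = (List.range 9).map (fun j => cols.getD j [] ++ vs.map (fun v => pvEntry v (j : Int))) := by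
  induction vs generalizing cols with
  | nil =>
    simp only [List.foldl_nil, List.map_nil, List.append_nil]
    apply List.ext_getElem
    · simp [hc]
    · intro j h1 h2
      simp only [List.getElem_map, List.getElem_range]
      rw [List.getD_eq_getElem _ _ (by omega)]
  | cons v vs ih =>
    rw [List.foldl_cons, pvStep cols v hc,
        ih _ (by simp)]
    apply List.map_congr_left
    intro j hj
    simp only [List.mem_range] at hj
    rw [List.getD_eq_getElem _ _ (by simp; omega)]
    simp [List.append_assoc]

-- A's inner loop over the keys is the map of pvEntry over the dict's values
theorem pvA_col (d : PySem.Dict String (List Int)) (hnd : (PySem.Dict.keys d).Nodup) (i : Int) :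
    (PySem.Dict.keys d).foldl
      (fun col vessel =>
        let vals := PySem.Dict.getD d vessel []
        if i < (vals.length : Int) then col ++ [PySem.List.pyGetD vals i 0]
        else col ++ [0])
      []
    = (PySem.Dict.values d).map (fun v => pvEntry v i) := by
  rw [PySem.List.foldl_congr_mem (PySem.Dict.keys d) _
        (fun col vessel => col ++ [pvEntry (PySem.Dict.getD d vessel []) i]) []
        (by intro acc vessel _; simp only [pvEntry]; split <;> rfl)]
  rw [PySem.List.foldl_append_singleton_eq_map, List.nil_append]
  have hkeys : PySem.Dict.keys d = (PySem.Dict.items d).map (·.1) := rfl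
  have hvals : PySem.Dict.values d = (PySem.Dict.items d).map (·.2) := rfl
  rw [hkeys, hvals, List.map_map, List.map_map]
  apply List.map_congr_left
  intro p hp
  simp only [Function.comp]
  rw [PySem.Dict.getD_of_mem_items d (k := p.1) (v := p.2) (by simpa using hp) hnd]

-- ===== VERDICT (by name: the statement is the Claim_ definition above) =====
theorem lists_are_easier_spec : Claim_equal_lists_are_easier := by
  intro histo_dict _
  unfold Spec_lists_are_easier lists_are_easier lists_are_easier_alt
  set d := PySem.Dict.ofList histo_dict with hd
  have hnd : (PySem.Dict.keys d).Nodup := PySem.Dict.nodup_keys_ofList histo_dict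
  rw [PySem.List.foldl_append_singleton_eq_map, List.nil_append]
  rw [pvB_fold _ _ (by simp)]
  have hr : PySem.List.pyRange 0 9 1 = [0,1,2,3,4,5,6,7,8] := by decide
  have hr2 : List.range 9 = [0,1,2,3,4,5,6,7,8] := by decide
  rw [hr, hr2]
  simp only [List.map_cons, List.map_nil, List.cons.injEq, and_true]
  refine ⟨?_, ?_, ?_, ?_, ?_, ?_, ?_, ?_, ?_⟩ <;>
    · rw [pvA_col d hnd]
      norm_num [List.getD]
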